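-- pv_equiv track=rewrite | github.com/kurtbell87/MBO-DL | .kit/results/label-design-sensitivity/run_experiment.py | assign_cpcv_groups
-- ===== SOURCE A (Python) =====
-- def assign_cpcv_groups(day_indices, n_groups):
--     unique_days = sorted(set(day_indices))
--     n_days = len(unique_days)
--     days_per_group = n_days // n_groups
--     remainder = n_days % n_groups
--
--     groups = {}
--     day_to_group = {}
--     start = 0
--     for g in range(n_groups):
--         size = days_per_group + (1 if g < remainder else 0)
--         group_days = unique_days[start:start + size]
--         groups[g] = group_days
--         for d in group_days:
--             day_to_group[d] = g
--         start += size
--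
--     return groups, day_to_group
-- ===== SOURCE B (Python) =====
-- def assign_cpcv_groups(day_indices, n_groups):
--     unique_days = sorted(set(day_indices))
--     q, r = divmod(len(unique_days), n_groups)
--     cut = r * (q + 1)
--     groups = {g: [] for g in range(n_groups)}
--     day_to_group = {}
--     for i, d in enumerate(unique_days):
--         g = i // (q + 1) if i < cut else r + (i - cut) // q
--         groups[g].append(d)
--         day_to_group[d] = g
--     return groups, day_to_group
-- ===== Notes on version B (the rewrite author's own statement) =====
-- stated objective: alternative
-- what changed: Replaces A's per-group loop with a running start pointer and list slicing by a single element-wise pass over the sorted unique days that computes each day's group index directly with closed-form positional arithmetic (g = i//(q+1) before the cut r*(q+1), else r+(i-cut)//q).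
-- outside the precondition, e.g. on assign_cpcv_groups([1], -1): A returns ({}, {}), B raises KeyError
import Mathlib
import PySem

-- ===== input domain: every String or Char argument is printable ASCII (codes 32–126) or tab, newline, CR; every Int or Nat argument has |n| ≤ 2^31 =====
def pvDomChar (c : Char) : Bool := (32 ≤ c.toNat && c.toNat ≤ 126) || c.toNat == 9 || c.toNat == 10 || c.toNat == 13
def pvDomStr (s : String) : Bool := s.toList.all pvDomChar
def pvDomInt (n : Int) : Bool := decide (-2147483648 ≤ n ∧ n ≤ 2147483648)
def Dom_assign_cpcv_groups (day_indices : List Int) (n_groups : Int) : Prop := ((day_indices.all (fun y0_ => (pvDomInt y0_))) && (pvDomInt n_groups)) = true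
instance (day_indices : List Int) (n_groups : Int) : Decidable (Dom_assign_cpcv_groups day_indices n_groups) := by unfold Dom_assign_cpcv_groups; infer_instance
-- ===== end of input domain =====

-- B replaces A's per-group slicing loop (running start pointer) by a single element-wise
-- pass over the sorted unique days, computing each day's group index with closed-form
-- positional arithmetic: an alternative decomposition, same cost. Equivalence proved on
-- Pre_ (n_groups > 0, or n_groups < 0 with an empty list); both raise at n_groups = 0.


-- ===== PORT A =====
def assign_cpcv_groups (day_indices : List Int) (n_groups : Int) : (List (Int × List Int)) × (List (Int × Int)) :=
  let unique_days : List Int := PySem.List.sorted (PySem.Set.ofList day_indices) (fun x => x) false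
  let n_days : Int := unique_days.length
  let days_per_group : Int := PySem.Int.floordiv n_days n_groups
  let remainder : Int := PySem.Int.mod n_days n_groups
  let st := (PySem.List.pyRange 0 n_groups 1).foldl
    (fun (s : PySem.Dict Int (List Int) × PySem.Dict Int Int × Int) g =>
      (s.1.insert g (PySem.List.slice unique_days (some s.2.2) (some (s.2.2 + (days_per_group + (if g < remainder then 1 else 0))))),
       (PySem.List.slice unique_days (some s.2.2) (some (s.2.2 + (days_per_group + (if g < remainder then 1 else 0))))).foldl
         (fun d2 d => d2.insert d g) s.2.1,
       s.2.2 + (days_per_group + (if g < remainder then 1 else 0))))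
    (PySem.Dict.empty, PySem.Dict.empty, (0 : Int))
  (st.1.items, st.2.1.items)

-- ===== PORT B =====
-- groups[g].append(d): inside Pre_ the key g is always present, so Dict.modify is exact
-- (Python's KeyError on a missing key only happens outside Pre_).
def assign_cpcv_groups_alt (day_indices : List Int) (n_groups : Int) : (List (Int × List Int)) × (List (Int × Int)) :=
  let unique_days : List Int := PySem.List.sorted (PySem.Set.ofList day_indices) (fun x => x) false
  let q : Int := PySem.Int.floordiv (unique_days.length : Int) n_groups
  let r : Int := PySem.Int.mod (unique_days.length : Int) n_groups
  let cut : Int := r * (q + 1)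
  let groups0 : PySem.Dict Int (List Int) :=
    (PySem.List.pyRange 0 n_groups 1).foldl (fun d g => d.insert g ([] : List Int)) PySem.Dict.empty
  let st := (PySem.List.enumerate unique_days 0).foldl
    (fun (s : PySem.Dict Int (List Int) × PySem.Dict Int Int) p =>
      let g : Int := if p.1 < cut then PySem.Int.floordiv p.1 (q + 1)
                     else r + PySem.Int.floordiv (p.1 - cut) q
      (s.1.modify g [] (fun l => l ++ [p.2]), s.2.insert p.2 g))
    (groups0, PySem.Dict.empty)
  (st.1.items, st.2.items)

-- ===== PRECONDITION & SPEC =====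
-- Pre_ excludes n_groups = 0, where both Pythons raise ZeroDivisionError, and negative
-- n_groups with a nonempty list, where A's empty result is an accident of range() over a
-- negative bound and B raises KeyError.
def Pre_assign_cpcv_groups (day_indices : List Int) (n_groups : Int) : Prop :=
  0 < n_groups ∨ (n_groups < 0 ∧ day_indices = [])
instance (day_indices : List Int) (n_groups : Int) : Decidable (Pre_assign_cpcv_groups day_indices n_groups) := by unfold Pre_assign_cpcv_groups; infer_instance

def pvWitness_assign_cpcv_groups : List Int × Int := ([3, 1, 2, 1, 5], 2)

def Spec_assign_cpcv_groups (day_indices : List Int) (n_groups : Int) (out : (List (Int × List Int)) × (List (Int × Int))) : Prop := out = assign_cpcv_groups_alt day_indices n_groups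
instance (day_indices : List Int) (n_groups : Int) (out : (List (Int × List Int)) × (List (Int × Int))) : Decidable (Spec_assign_cpcv_groups day_indices n_groups out) := by unfold Spec_assign_cpcv_groups; infer_instance

-- ===== CLAIM (what is proved, stated in full; the proofs are below) =====
def Claim_equal_assign_cpcv_groups : Prop := ∀ (day_indices : List Int) (n_groups : Int), Dom_assign_cpcv_groups day_indices n_groups → Pre_assign_cpcv_groups day_indices n_groups → Spec_assign_cpcv_groups day_indices n_groups (assign_cpcv_groups day_indices n_groups)

-- ===== LEMMAS AND PROOFS =====

-- B's per-index group formula and the position (first index) of each group.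
def pvG (q r i : Int) : Int :=
  if i < r * (q + 1) then PySem.Int.floordiv i (q + 1) else r + PySem.Int.floordiv (i - r * (q + 1)) q

def pvPos (q r a : Int) : Int := if a ≤ r then a * (q + 1) else r * (q + 1) + (a - r) * q

lemma pv_pos_succ (q r a : Int) :
    pvPos q r (a + 1) = pvPos q r a + (q + (if a < r then 1 else 0)) := by
  unfold pvPos
  rcases lt_trichotomy a r with h | h | h
  · rw [if_pos (by omega : a + 1 ≤ r), if_pos (le_of_lt h), if_pos h]; ring
  · subst h
    rw [if_neg (by omega), if_pos le_rfl, if_neg (lt_irrefl a)]; ring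
  · rw [if_neg (by omega), if_neg (by omega), if_neg (by omega)]; ring

lemma pv_g_eq (q r a i : Int) (hq : 0 ≤ q) (hr : 0 ≤ r)
    (h1 : pvPos q r a ≤ i) (h2 : i < pvPos q r a + (q + (if a < r then 1 else 0))) :
    pvG q r i = a := by
  unfold pvG
  by_cases har : a < r
  · have hpos : pvPos q r a = a * (q + 1) := by rw [pvPos, if_pos (le_of_lt har)]
    rw [hpos] at h1 h2
    rw [if_pos har] at h2
    have hcut : i < r * (q + 1) := by nlinarith
    rw [if_pos hcut, PySem.Int.floordiv_eq_ediv_of_pos (by omega)]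
    have hle : a ≤ i / (q + 1) := (Int.le_ediv_iff_mul_le (by omega)).mpr (by linarith)
    have hlt : i / (q + 1) < a + 1 := (Int.ediv_lt_iff_lt_mul (by omega)).mpr (by nlinarith)
    omega
  · have hra : r ≤ a := by omega
    have hpos : pvPos q r a = r * (q + 1) + (a - r) * q := by
      rw [pvPos]; split_ifs with h
      · have : a = r := le_antisymm h hra; subst this; ring
      · rfl
    rw [hpos] at h1 h2
    rw [if_neg har] at h2
    have hq1 : 0 < q := by linarith
    have hicut : ¬ i < r * (q + 1) := by nlinarith [mul_nonneg (sub_nonneg.mpr hra) hq]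
    rw [if_neg hicut, PySem.Int.floordiv_eq_ediv_of_pos hq1]
    have hle : a - r ≤ (i - r * (q + 1)) / q := (Int.le_ediv_iff_mul_le hq1).mpr (by nlinarith)
    have hlt : (i - r * (q + 1)) / q < a - r + 1 := (Int.ediv_lt_iff_lt_mul hq1).mpr (by nlinarith)
    omega

lemma pv_enum_fold (q r g0 : Int) :
    ∀ (chunk : List Int) (s0 : Int) (init : PySem.Dict Int (List Int) × PySem.Dict Int Int),
    (∀ i : Int, s0 ≤ i → i < s0 + chunk.length → pvG q r i = g0) →
    (PySem.List.enumerate chunk s0).foldl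
      (fun (s : PySem.Dict Int (List Int) × PySem.Dict Int Int) p =>
        (s.1.modify (pvG q r p.1) [] (fun l => l ++ [p.2]), s.2.insert p.2 (pvG q r p.1))) init
    = chunk.foldl
        (fun (s : PySem.Dict Int (List Int) × PySem.Dict Int Int) d =>
          (s.1.modify g0 [] (fun l => l ++ [d]), s.2.insert d g0)) init := by
  intro chunk
  induction chunk with
  | nil => intro s0 init h; simp [PySem.List.enumerate_nil]
  | cons c cs ih =>
    intro s0 init h
    rw [PySem.List.enumerate_cons]
    simp only [List.foldl_cons]
    rw [h s0 le_rfl (by simp only [List.length_cons]; push_cast; omega)]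
    exact ih (s0 + 1) _ (fun i hi1 hi2 => h i (by omega)
      (by simp only [List.length_cons] at hi2 ⊢; push_cast at hi2 ⊢; omega))

lemma pv_modify_mid {L R : List (Int × List Int)} {g : Int} {v : List Int} (f : List Int → List Int)
    (hL : ∀ p ∈ L, p.1 ≠ g) (hR : ∀ p ∈ R, p.1 ≠ g) :
    PySem.Dict.modify (PySem.Dict.mk (L ++ (g, v) :: R)) g [] f = PySem.Dict.mk (L ++ (g, f v) :: R) := by
  have hc : (PySem.Dict.mk (L ++ (g, v) :: R)).contains g = true := by
    simp [PySem.Dict.contains]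
  have hfind : List.find? (fun p => p.1 == g) (L ++ (g, v) :: R) = some (g, v) := by
    rw [List.find?_append]
    have : List.find? (fun p => p.1 == g) L = none := by
      rw [List.find?_eq_none]; intro p hp; simpa using hL p hp
    simp [this]
  simp only [PySem.Dict.modify, PySem.Dict.getD, PySem.Dict.get?, PySem.Dict.insert, hc, if_pos]
  simp only [hfind]
  congr 1
  simp only [List.map_append, List.map_cons]
  congr 1
  · conv_rhs => rw [← List.map_id L]
    exact List.map_congr_left (fun p hp => by simp [hL p hp])
  · congr 1
    · simp
    · conv_rhs => rw [← List.map_id R]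
      exact List.map_congr_left (fun p hp => by simp [hR p hp])

lemma pv_modify_fold (chunk : List Int) : ∀ (v : List Int) {L R : List (Int × List Int)} {g : Int}
    (hL : ∀ p ∈ L, p.1 ≠ g) (hR : ∀ p ∈ R, p.1 ≠ g),
    chunk.foldl (fun s d => PySem.Dict.modify s g [] (fun l => l ++ [d])) (PySem.Dict.mk (L ++ (g, v) :: R))
      = PySem.Dict.mk (L ++ (g, v ++ chunk) :: R) := by
  induction chunk with
  | nil => intro v _ _ _ _ _; simp
  | cons c cs ih =>
    intro v L R g hL hR
    simp only [List.foldl_cons, pv_modify_mid _ hL hR]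
    rw [ih (v ++ [c]) hL hR]
    simp

lemma pv_sum_nonneg (l : List Int) (q r : Int) (hq : 0 ≤ q) :
    0 ≤ (l.map (fun g => q + (if g < r then 1 else 0))).sum := by
  apply List.sum_nonneg
  intro x hx
  simp only [List.mem_map] at hx
  obtain ⟨g, _, rfl⟩ := hx
  split_ifs <;> omega

lemma pv_loop_eq (ud : List Int) (q r : Int) (hq : 0 ≤ q) (hr : 0 ≤ r) (k : Int) :
    ∀ (m : Nat) (a : Int), (k - a).toNat = m →
    ∀ (start : Nat) (GA : List (Int × List Int)) (D : PySem.Dict Int Int),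
    (∀ p ∈ GA, p.1 < a) →
    ((start : Int) = pvPos q r a) →
    ((start : Int) + ((PySem.List.pyRange a k 1).map (fun g => q + (if g < r then 1 else 0))).sum = ud.length) →
    (PySem.List.pyRange a k 1).foldl
      (fun (s : PySem.Dict Int (List Int) × PySem.Dict Int Int × Int) g =>
        (s.1.insert g (PySem.List.slice ud (some s.2.2) (some (s.2.2 + (q + (if g < r then 1 else 0))))),
         (PySem.List.slice ud (some s.2.2) (some (s.2.2 + (q + (if g < r then 1 else 0))))).foldl
           (fun d2 d => d2.insert d g) s.2.1,
         s.2.2 + (q + (if g < r then 1 else 0))))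
      (PySem.Dict.mk GA, D, (start : Int))
    = (((PySem.List.enumerate (ud.drop start) (start : Int)).foldl
          (fun (s : PySem.Dict Int (List Int) × PySem.Dict Int Int) p =>
            (s.1.modify (pvG q r p.1) [] (fun l => l ++ [p.2]), s.2.insert p.2 (pvG q r p.1)))
          (PySem.Dict.mk (GA ++ (PySem.List.pyRange a k 1).map (fun g => (g, ([] : List Int)))), D)).1,
       ((PySem.List.enumerate (ud.drop start) (start : Int)).foldl
          (fun (s : PySem.Dict Int (List Int) × PySem.Dict Int Int) p =>
            (s.1.modify (pvG q r p.1) [] (fun l => l ++ [p.2]), s.2.insert p.2 (pvG q r p.1)))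
          (PySem.Dict.mk (GA ++ (PySem.List.pyRange a k 1).map (fun g => (g, ([] : List Int)))), D)).2,
       (ud.length : Int)) := by
  intro m
  induction m with
  | zero =>
    intro a hm start GA D hkeys hstart hsum
    have hka : k ≤ a := by omega
    rw [PySem.List.pyRange_one_eq_nil hka] at *
    simp only [List.map_nil, List.sum_nil, add_zero] at hsum
    have hs : start = ud.length := by exact_mod_cast hsum
    subst hs
    simp [List.drop_length, PySem.List.enumerate_nil]
  | succ n ih =>
    intro a hm start GA D hkeys hstart hsum
    have hak : a < k := by omega
    rw [PySem.List.pyRange_one_cons hak] at *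
    set sz : Int := q + (if a < r then 1 else 0) with hsz
    have hsz0 : 0 ≤ sz := by rw [hsz]; split_ifs <;> omega
    have htail : 0 ≤ ((PySem.List.pyRange (a + 1) k 1).map (fun g => q + (if g < r then 1 else 0))).sum :=
      pv_sum_nonneg _ q r hq
    simp only [List.map_cons, List.sum_cons] at hsum
    have hszle : sz.toNat ≤ ud.length - start := by omega
    have hstartle : start ≤ ud.length := by omega
    have hslice : PySem.List.slice ud (some (start : Int)) (some ((start : Int) + sz))
        = (ud.drop start).take sz.toNat := by
      rw [PySem.List.slice_toNat ud (by positivity) (by omega)]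
      have h1 : ((start : Int) + sz).toNat - ((start : Int)).toNat = sz.toNat := by omega
      have h2 : ((start : Int)).toNat = start := by omega
      rw [h1, h2]
    set chunk : List Int := (ud.drop start).take sz.toNat with hchunk
    have hchlen : chunk.length = sz.toNat := by
      rw [hchunk, List.length_take, List.length_drop]; omega
    have hcont : (PySem.Dict.mk GA).contains a = false := by
      simp only [PySem.Dict.contains, List.any_eq_false]
      intro p hp
      have := hkeys p hp
      simp only [beq_iff_eq]
      omega
    have hins : (PySem.Dict.mk GA).insert a chunk = PySem.Dict.mk (GA ++ [(a, chunk)]) := by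
      apply PySem.Dict.ext
      rw [PySem.Dict.items_insert_of_not_contains _ _ hcont]
    have hscast : (start : Int) + sz = (((start + sz.toNat : Nat)) : Int) := by push_cast; omega
    have hdrop : ud.drop start = chunk ++ ud.drop (start + sz.toNat) := by
      conv_lhs => rw [← List.take_append_drop sz.toNat (ud.drop start)]
      rw [List.drop_drop, Nat.add_comm]
    rw [List.foldl_cons]
    simp only []
    rw [hslice, hins, hscast]
    rw [ih (a + 1) (by omega) (start + sz.toNat) (GA ++ [(a, chunk)]) (chunk.foldl (fun d2 d => d2.insert d a) D)
        (by intro p hp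
            rcases List.mem_append.mp hp with h | h
            · have := hkeys p h; omega
            · simp at h; subst h; omega)
        (by rw [pv_pos_succ q r a, ← hstart]; push_cast; omega)
        (by push_cast; omega)]
    -- now split the RHS enumerate fold at the first segment
    have hga : ∀ i : Int, (start : Int) ≤ i → i < (start : Int) + chunk.length → pvG q r i = a := by
      intro i hi1 hi2
      apply pv_g_eq q r a i hq hr (by rw [← hstart]; exact hi1)
      rw [← hstart, ← hsz]
      have : (chunk.length : Int) = sz := by rw [hchlen]; omega
      omega
    rw [hdrop, PySem.List.enumerate_append, List.foldl_append,
        pv_enum_fold q r a chunk (start : Int) _ hga]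
    rw [PySem.List.foldl_prod_mk (f := fun (G : PySem.Dict Int (List Int)) d => G.modify a [] (fun l => l ++ [d]))
        (g := fun (D2 : PySem.Dict Int Int) d => D2.insert d a)]
    rw [List.map_cons]
    have hR : ∀ p ∈ (PySem.List.pyRange (a + 1) k 1).map (fun g => (g, ([] : List Int))), p.1 ≠ a := by
      intro p hp
      simp only [List.mem_map] at hp
      obtain ⟨g, hg, rfl⟩ := hp
      have := (PySem.List.mem_pyRange_one.mp hg).1
      simp only []
      omega
    have hL : ∀ p ∈ GA, p.1 ≠ a := fun p hp => by have := hkeys p hp; omega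
    rw [show GA ++ (a, ([] : List Int)) :: (PySem.List.pyRange (a + 1) k 1).map (fun g => (g, ([] : List Int)))
        = GA ++ ((a, ([] : List Int)) :: (PySem.List.pyRange (a + 1) k 1).map (fun g => (g, ([] : List Int)))) from rfl]
    rw [pv_modify_fold chunk [] hL hR]
    have hcastlen : (start : Int) + (chunk.length : Int) = (((start + sz.toNat : Nat)) : Int) := by
      rw [hchlen]; push_cast; omega
    rw [hcastlen]
    simp only [List.nil_append, List.append_assoc, List.cons_append, List.nil_append]

lemma pv_sum_sizes (N k : Int) (hk : 0 < k) :
    ((PySem.List.pyRange 0 k 1).map (fun g => PySem.Int.floordiv N k + (if g < PySem.Int.mod N k then 1 else 0))).sum = N := by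
  set q : Int := PySem.Int.floordiv N k with hq
  set r : Int := PySem.Int.mod N k with hr
  have hr0 : 0 ≤ r := PySem.Int.mod_nonneg N hk
  have hrk : r < k := PySem.Int.mod_lt N hk
  have hqr : q * k + r = N := PySem.Int.floordiv_mul_add_mod N k
  rw [PySem.List.pyRange_one_append 0 r k hr0 (le_of_lt hrk), List.map_append, List.sum_append]
  have h1 : (PySem.List.pyRange 0 r 1).map (fun g => q + (if g < r then 1 else 0))
      = (PySem.List.pyRange 0 r 1).map (fun _ => q + 1) := by
    apply List.map_congr_left
    intro g hg
    have := (PySem.List.mem_pyRange_one.mp hg).2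
    simp [this]
  have h2 : (PySem.List.pyRange r k 1).map (fun g => q + (if g < r then 1 else 0))
      = (PySem.List.pyRange r k 1).map (fun _ => q) := by
    apply List.map_congr_left
    intro g hg
    have := (PySem.List.mem_pyRange_one.mp hg).1
    have : ¬ g < r := by omega
    simp [this]
  rw [h1, h2, PySem.List.sum_map_const_int, PySem.List.sum_map_const_int,
      PySem.List.length_pyRange_one, PySem.List.length_pyRange_one]
  have c1 : (((r - 0).toNat : Int)) = r := by omega
  have c2 : (((k - r).toNat : Int)) = k - r := by omega
  rw [c1, c2]
  ring_nf
  linarith [hqr]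

-- ===== VERDICT (by name: the statement is the Claim_ definition above) =====
theorem assign_cpcv_groups_spec : Claim_equal_assign_cpcv_groups := by
  intro di k hdom hpre
  unfold Spec_assign_cpcv_groups
  unfold assign_cpcv_groups assign_cpcv_groups_alt
  dsimp only
  set ud : List Int := PySem.List.sorted (PySem.Set.ofList di) (fun x => x) false with hud
  rcases hpre with hk | ⟨hk, hnil⟩
  · -- main case: n_groups > 0
    have hq : 0 ≤ PySem.Int.floordiv (ud.length : Int) k := by
      rw [PySem.Int.floordiv_eq_ediv_of_pos hk]
      exact Int.ediv_nonneg (by positivity) (le_of_lt hk)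
    have hr : 0 ≤ PySem.Int.mod (ud.length : Int) k := PySem.Int.mod_nonneg _ hk
    have hsum := pv_sum_sizes (ud.length : Int) k hk
    have hpos0 : ((0 : Nat) : Int) = pvPos (PySem.Int.floordiv (ud.length : Int) k) (PySem.Int.mod (ud.length : Int) k) 0 := by
      rw [pvPos, if_pos hr]; simp
    have key := pv_loop_eq ud (PySem.Int.floordiv (ud.length : Int) k) (PySem.Int.mod (ud.length : Int) k)
        hq hr k k.toNat 0 (by omega) 0 [] PySem.Dict.empty (by simp) hpos0 (by simpa using hsum)
    have hg0 : (PySem.List.pyRange 0 k 1).foldl (fun d g => d.insert g ([] : List Int)) PySem.Dict.empty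
        = PySem.Dict.mk ([] ++ (PySem.List.pyRange 0 k 1).map (fun g => (g, ([] : List Int)))) := by
      apply PySem.Dict.ext
      rw [PySem.Dict.items_foldl_insert_fresh (PySem.List.pyRange 0 k 1) (fun g => g) (fun _ => ([] : List Int))
          PySem.Dict.empty (by intro g hg; exact PySem.Dict.contains_empty g)
          (by simpa using PySem.List.nodup_pyRange_one 0 k)]
      simp [PySem.Dict.empty]
    rw [hg0]
    simp only [List.drop_zero, Nat.cast_zero] at key
    rw [show PySem.Dict.mk ([] : List (Int × List Int)) = (PySem.Dict.empty : PySem.Dict Int (List Int)) from rfl] at key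
    simp only [pvG] at key
    rw [key]
  · -- degenerate case: n_groups < 0 and day_indices = []
    subst hnil
    have hsnil : PySem.List.sorted ([] : List Int) (fun x => x) false = [] := by
      simp [PySem.List.sorted]
    rw [PySem.List.pyRange_one_eq_nil (le_of_lt hk)]
    simp [hud, hsnil, PySem.List.enumerate_nil]
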